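-- pv_equiv track=rewrite | github.com/AmitShanbhoug/ITI-1120 | Labs/Lab 5/lab5-students/Lab5_Solutions.py | ah
-- ===== SOURCE A (Python) =====
-- def ah(l,x,y):
--
--      '''(list, int,int)->(int,number/+inf)
--      Returns two numbers such that the first is the number of elements of the list
--      between x and y. The second number is the minimum element of that are between x and y.
--
--      Precondition: x <= y and the list contains numbers
--      '''
--
--      counter=0
--      min_in_range = None
--      for item in l:
--           if item>=x and item <=y:
--                counter=counter+1
--                if(min_in_range == None or item <= min_in_range):
--                     min_in_range=item
--
--      return(counter,min_in_range)
-- ===== SOURCE B (Python) =====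
-- def ah(l, x, y):
--     s = sorted(l)
--     i = 0
--     while i < len(s) and s[i] < x:
--         i += 1
--     j = i
--     while j < len(s) and s[j] <= y:
--         j += 1
--     return (j - i, s[i] if j > i else None)
-- ===== Notes on version B (the rewrite author's own statement) =====
-- stated objective: alternative
-- what changed: Instead of one fused loop maintaining a counter and a running minimum, B sorts the list and locates the [x,y] window as a contiguous segment with two index-advancing scans; the count is the segment width and the minimum is simply the segment's first element.
import Mathlib
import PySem

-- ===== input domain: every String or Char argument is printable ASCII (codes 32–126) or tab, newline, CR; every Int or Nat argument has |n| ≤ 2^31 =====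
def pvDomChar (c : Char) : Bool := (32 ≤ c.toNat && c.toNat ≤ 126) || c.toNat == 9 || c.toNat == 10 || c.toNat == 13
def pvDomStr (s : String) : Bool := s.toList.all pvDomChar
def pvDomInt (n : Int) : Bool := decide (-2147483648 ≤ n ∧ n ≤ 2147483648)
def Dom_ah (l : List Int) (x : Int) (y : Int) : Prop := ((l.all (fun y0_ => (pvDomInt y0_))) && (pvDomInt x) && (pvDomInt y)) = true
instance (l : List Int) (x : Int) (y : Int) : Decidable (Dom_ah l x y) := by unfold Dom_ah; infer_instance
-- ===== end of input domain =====

-- B sorts the list and finds the [x,y] window as a contiguous segment via two index scans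
-- (count = segment width, min = first element of the segment) instead of A's fused
-- counter/running-minimum loop; objective: alternative.

-- ===== PORT A =====
-- the loop body: update (counter, min_in_range) for one item, branches in A's order
def ahStep (x : Int) (y : Int) (s : Int × Option Int) (item : Int) : Int × Option Int :=
  if item ≥ x ∧ item ≤ y then
    ( s.1 + 1
    , if s.2 = none ∨ (∃ m, s.2 = some m ∧ item ≤ m) then some item else s.2 )
  else s

def ah (l : List Int) (x : Int) (y : Int) : Int × Option Int :=
  l.foldl (ahStep x y) (0, none)

-- ===== PORT B =====
-- 'while i < len(s) and s[i] < x: i += 1' — the loop examines the successive elements of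
-- the remaining suffix of s, advancing the index i; transcribed as structural recursion
-- over that suffix carrying i.
def ahAdvLt (x : Int) : List Int → Nat → Nat
  | [], i => i
  | v :: t, i => if v < x then ahAdvLt x t (i + 1) else i

-- 'while j < len(s) and s[j] <= y: j += 1', started at index i over the suffix s.drop i
def ahAdvLe (y : Int) : List Int → Nat → Nat
  | [], j => j
  | v :: t, j => if v ≤ y then ahAdvLe y t (j + 1) else j

def ah_alt (l : List Int) (x : Int) (y : Int) : Int × Option Int :=
  let s := PySem.List.sorted l (fun v => v) false
  let i := ahAdvLt x s 0
  let j := ahAdvLe y (s.drop i) i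
  ( (j : Int) - (i : Int)
  , if j > i then PySem.List.pyGet? s (i : Int) else none )  -- s[i]; in range whenever j > i

-- ===== PRECONDITION & SPEC =====
def Spec_ah (l : List Int) (x : Int) (y : Int) (out : Int × Option Int) : Prop := out = ah_alt l x y
instance (l : List Int) (x : Int) (y : Int) (out : Int × Option Int) : Decidable (Spec_ah l x y out) := by unfold Spec_ah; infer_instance

-- ===== CLAIM (what is proved, stated in full; the proofs are below) =====
def Claim_equal_ah : Prop := ∀ (l : List Int) (x : Int) (y : Int), Dom_ah l x y → Spec_ah l x y (ah l x y)

-- ===== LEMMAS AND PROOFS =====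

theorem ahStep_in {x y : Int} (s : Int × Option Int) (v : Int) (h : x ≤ v ∧ v ≤ y) :
    ahStep x y s v = (s.1 + 1, some (match s.2 with | none => v | some m => min v m)) := by
  unfold ahStep
  rw [if_pos ⟨h.1, h.2⟩]
  cases s with
  | mk c m =>
    cases m with
    | none => simp
    | some m =>
      simp only []
      by_cases hv : v ≤ m
      · rw [if_pos (Or.inr ⟨m, rfl, hv⟩)]
        simp [min_eq_left hv]
      · rw [if_neg (by simp; omega)]
        simp [min_eq_right (show m ≤ v by omega)]

theorem ahStep_out {x y : Int} (s : Int × Option Int) (v : Int) (h : ¬ (x ≤ v ∧ v ≤ y)) :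
    ahStep x y s v = s := by
  unfold ahStep
  rw [if_neg (by exact fun hc => h ⟨hc.1, hc.2⟩)]

-- the option-valued min-folding function A's loop implements on the filtered elements
def ahMinF (mo : Option Int) (v : Int) : Option Int :=
  some (match mo with | none => v | some w => min v w)

-- A's loop computes the count and min-fold of the filtered list, for arbitrary accumulator
theorem ah_loop (l : List Int) (x y : Int) : ∀ (c : Int) (m : Option Int),
    l.foldl (ahStep x y) (c, m) =
      ( c + ((l.filter (fun v => x ≤ v ∧ v ≤ y)).length : Int)
      , (l.filter (fun v => x ≤ v ∧ v ≤ y)).foldl ahMinF m ) := by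
  induction l with
  | nil => intro c m; simp
  | cons a t ih =>
    intro c m
    by_cases h : x ≤ a ∧ a ≤ y
    · rw [List.foldl_cons, ahStep_in (c, m) a h, ih,
        List.filter_cons_of_pos (by simpa using h), List.length_cons, List.foldl_cons]
      exact Prod.ext (by push_cast; ring) rfl
    · rw [List.foldl_cons, ahStep_out (c, m) a h,
        List.filter_cons_of_neg (by simpa using h)]
      exact ih c m

theorem fold_min_some (t : List Int) : ∀ (a : Int),
    t.foldl ahMinF (some a) = some (t.foldl min a) := by
  induction t with
  | nil => intro a; rfl
  | cons b t ih =>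
    intro a
    simp only [List.foldl_cons, ahMinF]
    rw [show min b a = min a b from min_comm b a] at *
    exact ih (min a b)

theorem fold_min_self (t : List Int) (a : Int) (h : ∀ b ∈ t, a ≤ b) :
    t.foldl min a = a := by
  induction t with
  | nil => rfl
  | cons b t ih =>
    rw [List.foldl_cons, min_eq_left (h b (by simp))]
    exact ih (fun c hc => h c (by simp [hc]))

-- the index loops count how far the takeWhile prefix of the scanned suffix extends
theorem ahAdvLt_eq (x : Int) (t : List Int) : ∀ (i : Nat),
    ahAdvLt x t i = i + (t.takeWhile (fun v => decide (v < x))).length := by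
  induction t with
  | nil => intro i; simp [ahAdvLt]
  | cons a t ih =>
    intro i
    by_cases h : a < x
    · simp [ahAdvLt, h, ih]; omega
    · simp [ahAdvLt, h]

theorem ahAdvLe_eq (y : Int) (t : List Int) : ∀ (j : Nat),
    ahAdvLe y t j = j + (t.takeWhile (fun v => decide (v ≤ y))).length := by
  induction t with
  | nil => intro j; simp [ahAdvLe]
  | cons a t ih =>
    intro j
    by_cases h : a ≤ y
    · simp [ahAdvLe, h, ih]; omega
    · simp [ahAdvLe, h]

theorem drop_takeWhile_length (p : Int → Bool) (s : List Int) :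
    s.drop (s.takeWhile p).length = s.dropWhile p := by
  induction s with
  | nil => rfl
  | cons a t ih =>
    by_cases h : p a
    · simpa [h] using ih
    · simp [h]

-- on a ≤-sorted list, all-≤y elements form a prefix: takeWhile = filter
theorem takeWhile_le_eq_filter (y : Int) (t : List Int) (hp : t.Pairwise (· ≤ ·)) :
    t.takeWhile (fun v => decide (v ≤ y)) = t.filter (fun v => decide (v ≤ y)) := by
  induction t with
  | nil => rfl
  | cons a t ih =>
    rcases List.pairwise_cons.mp hp with ⟨ha, ht⟩
    by_cases h : a ≤ y
    · simp [h, ih ht]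
    · rw [List.takeWhile_cons]
      simp only [h, decide_false, Bool.false_eq_true, if_false]
      rw [List.filter_cons_of_neg (by simpa using h)]
      rw [List.filter_eq_nil_iff.mpr]
      intro b hb
      simp only [decide_eq_true_eq]
      have := ha b hb
      omega

-- on a ≤-sorted list, the [x,y]-window is exactly takeWhile (≤ y) of dropWhile (< x)
theorem seg_eq_filter (x y : Int) (s : List Int) (hp : s.Pairwise (· ≤ ·)) :
    (s.dropWhile (fun v => decide (v < x))).takeWhile (fun v => decide (v ≤ y))
      = s.filter (fun v => x ≤ v ∧ v ≤ y) := by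
  induction s with
  | nil => rfl
  | cons a t ih =>
    rcases List.pairwise_cons.mp hp with ⟨ha, ht⟩
    by_cases h : a < x
    · rw [List.dropWhile_cons_of_pos (by simpa using h),
        List.filter_cons_of_neg (by simp; omega)]
      exact ih ht
    · rw [List.dropWhile_cons_of_neg (by simpa using h)]
      by_cases hy : a ≤ y
      · rw [List.takeWhile_cons_of_pos (by simpa using hy),
          List.filter_cons_of_pos (by simp; omega)]
        congr 1
        rw [takeWhile_le_eq_filter y t ht]
        apply List.filter_congr
        intro b hb
        have := ha b hb
        simp only [decide_eq_decide]
        omega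
      · rw [List.takeWhile_cons_of_neg (by simpa using hy),
          List.filter_cons_of_neg (by simp; omega)]
        rw [List.filter_eq_nil_iff.mpr]
        intro b hb
        have := ha b hb
        simp only [decide_eq_true_eq]
        omega

theorem ahMinF_comm : ∀ (z : Option Int) (u v : Int),
    ahMinF (ahMinF z u) v = ahMinF (ahMinF z v) u := by
  intro z u v
  cases z <;> simp [ahMinF, min_comm u v, min_left_comm]

-- ===== VERDICT (by name: the statement is the Claim_ definition above) =====
theorem ah_spec : Claim_equal_ah := by
  intro l x y _
  unfold Spec_ah ah
  rw [ah_loop]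
  simp only [ah_alt]
  set s := PySem.List.sorted l (fun v => v) false with hs
  have hperm : s.Perm l := PySem.List.sorted_perm l (fun v => v) false
  have hpw : s.Pairwise (· ≤ ·) := by
    have := PySem.List.sorted_pairwise (xs := l) (key := fun v => v)
    simpa using this
  have hfperm : (l.filter (fun v => x ≤ v ∧ v ≤ y)).Perm (s.filter (fun v => x ≤ v ∧ v ≤ y)) :=
    (hperm.filter _).symm
  -- transfer A's count and fold to the sorted list's filter
  have hlen : ((l.filter (fun v => x ≤ v ∧ v ≤ y)).length : Int)
      = ((s.filter (fun v => x ≤ v ∧ v ≤ y)).length : Int) := by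
    rw [hfperm.length_eq]
  have hfold : (l.filter (fun v => x ≤ v ∧ v ≤ y)).foldl ahMinF none
      = (s.filter (fun v => x ≤ v ∧ v ≤ y)).foldl ahMinF none :=
    hfperm.foldl_eq' (fun u _ v _ z => ahMinF_comm z u v) none
  rw [hlen, hfold]
  -- identify B's indices with prefix lengths
  rw [ahAdvLt_eq, ahAdvLe_eq]
  simp only [Nat.zero_add]
  rw [drop_takeWhile_length]
  set i := (s.takeWhile (fun v => decide (v < x))).length with hi
  set F := (s.dropWhile (fun v => decide (v < x))).takeWhile (fun v => decide (v ≤ y)) with hF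
  have hFf : F = s.filter (fun v => x ≤ v ∧ v ≤ y) := seg_eq_filter x y s hpw
  rw [← hFf]
  cases hFc : F with
  | nil =>
    simp only [List.length_nil, List.foldl_nil]
    rw [Prod.mk.injEq]
    refine ⟨by push_cast; omega, by rw [if_neg (by omega)]⟩
  | cons a t =>
    -- dropWhile starts with a, so s[i] = a
    have hdw : s.dropWhile (fun v => decide (v < x)) = a :: (s.dropWhile (fun v => decide (v < x))).tail := by
      cases hd : s.dropWhile (fun v => decide (v < x)) with
      | nil => rw [hd] at hF; simp [hF] at hFc
      | cons b u =>
        rw [hd] at hF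
        rw [List.takeWhile_cons] at hF
        by_cases hb : b ≤ y
        · simp only [hb, decide_true, if_true] at hF
          rw [hF] at hFc
          injection hFc with h1 _
          simp [h1]
        · simp [hb] at hF; simp [hF] at hFc
    have hget : PySem.List.pyGet? s ((i : Nat) : Int) = some a := by
      rw [PySem.List.pyGet?_natCast]
      have hdrop : s.drop i = a :: (s.dropWhile (fun v => decide (v < x))).tail := by
        rw [hi, drop_takeWhile_length]; exact hdw
      have h0 : s[i]? = (s.drop i)[0]? := by
        rw [List.getElem?_drop]
        simp
      rw [h0, hdrop]
      rfl
    -- min of the nonempty sorted segment is its head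
    have hamem : ∀ b ∈ t, a ≤ b := by
      have hpF : F.Pairwise (· ≤ ·) := by
        rw [hFf]; exact hpw.filter _
      rw [hFc] at hpF
      exact (List.pairwise_cons.mp hpF).1
    rw [Prod.mk.injEq]
    refine ⟨by push_cast; omega, ?_⟩
    rw [if_pos (by simp only [List.length_cons]; omega)]
    rw [hget, List.foldl_cons,
      show ahMinF none a = some a from rfl, fold_min_some, fold_min_self t a hamem]
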